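-- pv_equiv track=rewrite | github.com/BBN-E/Hume | src/python/cyberlingo/event/train_test.py | parse_filelist_line
-- ===== SOURCE A (Python) =====
-- def parse_filelist_line(line):
--     text_file = None
--     idt_file = None
--     enote_file = None
--     acetext_file = None # ACE text file, where we only care about texts not within xml-tags
--     apf_file = None     # ACE xml file
--
--     for file in line.strip().split():
--         if file.startswith('TEXT:'):
--             text_file = file[len('TEXT:'):]
--         elif file.startswith('IDT:'):
--             idt_file = file[len('IDT:'):]
--         elif file.startswith('ENOTE:'):
--             enote_file = file[len('ENOTE:'):]
--         elif file.startswith('ACETEXT:'):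
--             acetext_file = file[len('ACETEXT:'):]
--         elif file.startswith('APF:'):
--             apf_file = file[len('APF:'):]
--
--     if text_file is None and acetext_file is None:
--         raise ValueError('text_file or acetext_file must be present!')
--     return (text_file, idt_file, enote_file, acetext_file, apf_file)
-- ===== SOURCE B (Python) =====
-- def _last_match(prefix, rev_tokens):
--     for tok in rev_tokens:
--         if tok.startswith(prefix):
--             return tok[len(prefix):]
--     return None
--
-- def parse_filelist_line(line):
--     rev = list(reversed(line.strip().split()))
--     text_file = _last_match('TEXT:', rev)
--     idt_file = _last_match('IDT:', rev)
--     enote_file = _last_match('ENOTE:', rev)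
--     acetext_file = _last_match('ACETEXT:', rev)
--     apf_file = _last_match('APF:', rev)
--     if text_file is None and acetext_file is None:
--         raise ValueError('text_file or acetext_file must be present!')
--     return (text_file, idt_file, enote_file, acetext_file, apf_file)
-- ===== Notes on version B (the rewrite author's own statement) =====
-- stated objective: alternative
-- what changed: Replaces A's single forward fold over five mutable slots with five independent backward scans of the reversed token list (first match in reverse = last-wins), so no slot state is threaded through the loop.
import Mathlib
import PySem

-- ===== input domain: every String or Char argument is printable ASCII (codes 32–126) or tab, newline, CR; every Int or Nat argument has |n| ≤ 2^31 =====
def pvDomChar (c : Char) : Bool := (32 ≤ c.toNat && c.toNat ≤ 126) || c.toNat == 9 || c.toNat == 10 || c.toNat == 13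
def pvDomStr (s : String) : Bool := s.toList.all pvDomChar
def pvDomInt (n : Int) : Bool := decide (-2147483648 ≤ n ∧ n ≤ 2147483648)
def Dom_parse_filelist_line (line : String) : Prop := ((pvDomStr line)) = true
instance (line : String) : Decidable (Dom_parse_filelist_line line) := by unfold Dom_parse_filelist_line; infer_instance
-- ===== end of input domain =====

-- B replaces A's single forward fold over five mutable slots with five independent
-- backward scans (first match in the reversed token list = A's last-wins); same cost.

-- ===== PORT A =====
-- one loop iteration of A: the if/elif cascade updating the five slots
def pvStepA (st : Option String × Option String × Option String × Option String × Option String)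
    (file : String) : Option String × Option String × Option String × Option String × Option String :=
  let (t, i, e, a, p) := st
  if PySem.Str.startswith file "TEXT:" then (some (PySem.Str.slice file (some 5) none), i, e, a, p)
  else if PySem.Str.startswith file "IDT:" then (t, some (PySem.Str.slice file (some 4) none), e, a, p)
  else if PySem.Str.startswith file "ENOTE:" then (t, i, some (PySem.Str.slice file (some 6) none), a, p)
  else if PySem.Str.startswith file "ACETEXT:" then (t, i, e, some (PySem.Str.slice file (some 8) none), p)
  else if PySem.Str.startswith file "APF:" then (t, i, e, a, some (PySem.Str.slice file (some 4) none))
  else (t, i, e, a, p)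

-- the final 'raise' of A lies outside Pre_; the returned tuple is ported
def parse_filelist_line (line : String) :
    Option String × Option String × Option String × Option String × Option String :=
  (PySem.Str.split₀ (PySem.Str.strip line)).foldl pvStepA (none, none, none, none, none)

-- ===== PORT B =====
-- _last_match: scan the reversed token list, return the stripped first hit
def pvLastMatch (pre : String) : List String → Option String
  | [] => none
  | tok :: rest =>
    if PySem.Str.startswith tok pre then
      some (PySem.Str.slice tok (some (PySem.Str.len pre)) none)
    else pvLastMatch pre rest

-- the final 'raise' of B lies outside Pre_; the returned tuple is ported
def parse_filelist_line_alt (line : String) :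
    Option String × Option String × Option String × Option String × Option String :=
  let rev := (PySem.Str.split₀ (PySem.Str.strip line)).reverse
  (pvLastMatch "TEXT:" rev, pvLastMatch "IDT:" rev, pvLastMatch "ENOTE:" rev,
   pvLastMatch "ACETEXT:" rev, pvLastMatch "APF:" rev)

-- ===== PRECONDITION & SPEC =====
-- Pre_ excludes exactly the lines with no 'TEXT:'- and no 'ACETEXT:'-labelled token,
-- on which both A and B raise ValueError.
def Pre_parse_filelist_line (line : String) : Prop :=
  ((PySem.Str.split₀ (PySem.Str.strip line)).any
    (fun t => PySem.Str.startswith t "TEXT:" || PySem.Str.startswith t "ACETEXT:")) = true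

instance (line : String) : Decidable (Pre_parse_filelist_line line) := by
  unfold Pre_parse_filelist_line; infer_instance

def pvWitness_parse_filelist_line : String := "TEXT:doc.sgm IDT:doc.idt"

def Spec_parse_filelist_line (line : String)
    (out : Option String × Option String × Option String × Option String × Option String) : Prop :=
  out = parse_filelist_line_alt line

instance (line : String) (out : Option String × Option String × Option String × Option String × Option String) :
    Decidable (Spec_parse_filelist_line line out) := by unfold Spec_parse_filelist_line; infer_instance

-- ===== CLAIM (what is proved, stated in full; the proofs are below) =====
def Claim_equal_parse_filelist_line : Prop :=
  ∀ (line : String), Dom_parse_filelist_line line → Pre_parse_filelist_line line →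
    Spec_parse_filelist_line line (parse_filelist_line line)

-- ===== LEMMAS AND PROOFS =====

-- two prefixes differing in their first character cannot both be prefixes of tok
lemma pv_excl1 {c d : Char} (hne : c ≠ d) {p q tok : List Char}
    (h : PySem.Chars.startswith tok (c :: p) = true) :
    PySem.Chars.startswith tok (d :: q) = false := by
  cases tok with
  | nil => rfl
  | cons x xs =>
    simp only [PySem.Chars.startswith, List.isPrefixOf, Bool.and_eq_true, beq_iff_eq] at h
    have hd : (d == x) = false := beq_eq_false_iff_ne.mpr (h.1 ▸ Ne.symm hne)
    simp [PySem.Chars.startswith, List.isPrefixOf, hd]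

-- same, differing in the second character
lemma pv_excl2 {c c' d d' : Char} (hne : c' ≠ d') {p q tok : List Char}
    (h : PySem.Chars.startswith tok (c :: c' :: p) = true) :
    PySem.Chars.startswith tok (d :: d' :: q) = false := by
  cases tok with
  | nil => rfl
  | cons x xs =>
    cases xs with
    | nil =>
      simp [PySem.Chars.startswith, List.isPrefixOf] at h
    | cons y ys =>
      simp only [PySem.Chars.startswith, List.isPrefixOf, Bool.and_eq_true, beq_iff_eq] at h
      have hd' : (d' == y) = false := beq_eq_false_iff_ne.mpr (h.2.1 ▸ Ne.symm hne)
      simp [PySem.Chars.startswith, List.isPrefixOf, hd']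

-- A's cascade acts on each slot independently (the five prefixes are mutually exclusive)
lemma pvStepA_eq (s : Option String × Option String × Option String × Option String × Option String)
    (tok : String) :
    pvStepA s tok =
      ((if PySem.Str.startswith tok "TEXT:" then some (PySem.Str.slice tok (some 5) none) else s.1),
       (if PySem.Str.startswith tok "IDT:" then some (PySem.Str.slice tok (some 4) none) else s.2.1),
       (if PySem.Str.startswith tok "ENOTE:" then some (PySem.Str.slice tok (some 6) none) else s.2.2.1),
       (if PySem.Str.startswith tok "ACETEXT:" then some (PySem.Str.slice tok (some 8) none) else s.2.2.2.1),
       (if PySem.Str.startswith tok "APF:" then some (PySem.Str.slice tok (some 4) none) else s.2.2.2.2)) := by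
  obtain ⟨t, i, e, a, p⟩ := s
  simp only [pvStepA, PySem.Str.startswith_eq]
  by_cases h1 : PySem.Chars.startswith tok.toList (['T','E','X','T',':'] : List Char) = true
  · simp [h1, pv_excl1 (by decide : ('T' : Char) ≠ 'I') h1,
      pv_excl1 (by decide : ('T' : Char) ≠ 'E') h1, pv_excl1 (by decide : ('T' : Char) ≠ 'A') h1]
  by_cases h2 : PySem.Chars.startswith tok.toList (['I','D','T',':'] : List Char) = true
  · simp [h1, h2, pv_excl1 (by decide : ('I' : Char) ≠ 'E') h2,
      pv_excl1 (by decide : ('I' : Char) ≠ 'A') h2]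
  by_cases h3 : PySem.Chars.startswith tok.toList (['E','N','O','T','E',':'] : List Char) = true
  · simp [h1, h2, h3, pv_excl1 (by decide : ('E' : Char) ≠ 'A') h3]
  by_cases h4 : PySem.Chars.startswith tok.toList (['A','C','E','T','E','X','T',':'] : List Char) = true
  · simp [h1, h2, h3, h4, pv_excl2 (by decide : ('C' : Char) ≠ 'P') h4]
  by_cases h5 : PySem.Chars.startswith tok.toList (['A','P','F',':'] : List Char) = true
  · simp [h1, h2, h3, h4, h5]
  · simp [h1, h2, h3, h4, h5]

-- scanning l ++ [t] backwards: the appended token wins only if nothing in l matched it... (front scan: l first)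
lemma pvLastMatch_append (pre : String) (l : List String) (t : String) :
    pvLastMatch pre (l ++ [t]) =
      (pvLastMatch pre l).or
        (if PySem.Str.startswith t pre then
          some (PySem.Str.slice t (some (PySem.Str.len pre)) none) else none) := by
  induction l with
  | nil => simp only [List.nil_append, pvLastMatch]; split <;> simp
  | cons x xs ih =>
    simp only [List.cons_append, pvLastMatch]
    split <;> simp [ih]

-- the loop invariant: A's fold equals B's five backward scans, overriding the initial state
lemma pv_fold_eq (ts : List String)
    (s : Option String × Option String × Option String × Option String × Option String) :
    ts.foldl pvStepA s =
      ((pvLastMatch "TEXT:" ts.reverse).or s.1,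
       (pvLastMatch "IDT:" ts.reverse).or s.2.1,
       (pvLastMatch "ENOTE:" ts.reverse).or s.2.2.1,
       (pvLastMatch "ACETEXT:" ts.reverse).or s.2.2.2.1,
       (pvLastMatch "APF:" ts.reverse).or s.2.2.2.2) := by
  induction ts generalizing s with
  | nil => simp [pvLastMatch]
  | cons t ts ih =>
    simp only [List.foldl_cons, List.reverse_cons, pvLastMatch_append, ih, pvStepA_eq]
    refine Prod.ext ?_ (Prod.ext ?_ (Prod.ext ?_ (Prod.ext ?_ ?_))) <;>
      simp [Option.or_assoc] <;> split <;> simp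

-- ===== VERDICT (by name: the statement is the Claim_ definition above) =====
theorem parse_filelist_line_spec : Claim_equal_parse_filelist_line := by
  intro line _ _
  unfold Spec_parse_filelist_line parse_filelist_line parse_filelist_line_alt
  simp [pv_fold_eq]
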